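-- pv_equiv track=rewrite | github.com/Nikolaystst/NSS_fundamentals_lectures_and_exercises | fundamentals/8_text_procesing/ex/9.py | word_to_capitalize
-- ===== SOURCE A (Python) =====
-- def word_to_capitalize(word):
--     word_to_print = ""
--     final_word = ""
--     letter = 0
--     while word:
--         if not word[letter].isdigit():
--             word_to_print += word[letter]
--         elif letter < len(word) - 1 and word[letter].isdigit() and word[letter + 1].isdigit():
--             final_word += word_to_print.upper() * int(f"{word[letter]}{word[letter + 1]}")
--             word_to_print = ""
--         else:
--             final_word += word_to_print.upper() * int(word[letter])
--             word_to_print = ""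
--         word = word[1:]
--     return final_word
-- ===== SOURCE B (Python) =====
-- from itertools import groupby
--
-- def word_to_capitalize(word):
--     out = []
--     buf = ""
--     for is_digit, grp in groupby(word, key=str.isdigit):
--         run = "".join(grp)
--         if is_digit:
--             num = int(run[:2]) if len(run) >= 2 else int(run)
--             out.append(buf.upper() * num)
--             buf = ""
--         else:
--             buf = run
--     return "".join(out)
-- ===== Notes on version B (the rewrite author's own statement) =====
-- stated objective: idiomatic
-- what changed: B groups the word into maximal letter/digit runs (itertools.groupby) and processes whole runs -- taking the first one or two digits of each digit-run as the multiplier -- instead of A's per-character state machine that re-slices the string (word = word[1:]) each step.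
import Mathlib
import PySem

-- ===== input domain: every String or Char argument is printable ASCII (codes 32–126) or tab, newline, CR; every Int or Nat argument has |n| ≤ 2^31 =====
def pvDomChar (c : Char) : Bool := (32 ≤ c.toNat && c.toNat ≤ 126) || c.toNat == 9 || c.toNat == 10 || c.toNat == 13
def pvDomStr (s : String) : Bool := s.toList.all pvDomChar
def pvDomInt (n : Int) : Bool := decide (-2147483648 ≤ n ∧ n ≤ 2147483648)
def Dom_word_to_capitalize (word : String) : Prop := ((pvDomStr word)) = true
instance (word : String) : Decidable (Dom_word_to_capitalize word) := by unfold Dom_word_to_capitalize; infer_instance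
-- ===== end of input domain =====

-- B replaces A's per-character state machine by a run-grouping traversal (groupby into
-- letter/digit runs); idiomatic re-decomposition, same observable result.


-- ===== PORT A =====
-- int(s) on a digit string; .getD 0 is unreachable on the checked domain: A only calls
-- int() on chars with isdigit = true, which in printable ASCII are exactly '0'..'9'.
def pvAint (cs : List Char) : Int := (PySem.Int.ofChars? cs).getD 0

-- the while loop: word consumed one char at a time (word = word[1:]); letter is always 0,
-- so word[letter] is the head and word[letter+1] the head of the tail.
def pvAgo : List Char → List Char → List Char → List Char
  | [], _wtp, fw => fw
  | c :: rest, wtp, fw =>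
    if !(PySem.Chars.isdigit c) then
      pvAgo rest (wtp ++ [c]) fw
    else
      match rest with
      | d :: _ =>
        if PySem.Chars.isdigit d then
          pvAgo rest [] (fw ++ PySem.List.pyRepeat (PySem.Chars.upper wtp) (pvAint [c, d]))
        else
          pvAgo rest [] (fw ++ PySem.List.pyRepeat (PySem.Chars.upper wtp) (pvAint [c]))
      | [] =>
        pvAgo rest [] (fw ++ PySem.List.pyRepeat (PySem.Chars.upper wtp) (pvAint [c]))

def word_to_capitalize (word : String) : String :=
  String.ofList (pvAgo word.toList [] [])

-- ===== PORT B =====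
-- itertools.groupby(word, key=str.isdigit): maximal runs with their key
def pvRunsBy : List Char → List (Bool × List Char)
  | [] => []
  | c :: cs =>
    (PySem.Chars.isdigit c, c :: cs.takeWhile (fun d => PySem.Chars.isdigit d == PySem.Chars.isdigit c))
      :: pvRunsBy (cs.dropWhile (fun d => PySem.Chars.isdigit d == PySem.Chars.isdigit c))
termination_by l => l.length
decreasing_by
  simpa using Nat.lt_succ_of_le (List.length_dropWhile_le _ cs)

-- num = int(run[:2]) if len(run) >= 2 else int(run)  (.getD 0 unreachable: digit runs in
-- the checked domain consist of '0'..'9')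
def pvBnum (run : List Char) : Int :=
  if 2 ≤ run.length then (PySem.Int.ofChars? (run.take 2)).getD 0
  else (PySem.Int.ofChars? run).getD 0

-- the for loop over the runs, out a list of pieces joined at the end
def pvBgo : List (Bool × List Char) → List Char → List (List Char) → List (List Char)
  | [], _buf, out => out
  | (isDig, run) :: rs, buf, out =>
    if isDig then
      pvBgo rs [] (out ++ [PySem.List.pyRepeat (PySem.Chars.upper buf) (pvBnum run)])
    else
      pvBgo rs run out

def word_to_capitalize_alt (word : String) : String :=
  String.ofList (pvBgo (pvRunsBy word.toList) [] []).flatten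

-- ===== PRECONDITION & SPEC =====
def Spec_word_to_capitalize (word : String) (out : String) : Prop := out = word_to_capitalize_alt word
instance (word : String) (out : String) : Decidable (Spec_word_to_capitalize word out) := by unfold Spec_word_to_capitalize; infer_instance

-- ===== CLAIM (what is proved, stated in full; the proofs are below) =====
def Claim_equal_word_to_capitalize : Prop := ∀ (word : String), Dom_word_to_capitalize word → Spec_word_to_capitalize word (word_to_capitalize word)

-- ===== LEMMAS AND PROOFS =====

-- one-step equations for A's loop
theorem pvAgo_nil (wtp fw : List Char) : pvAgo [] wtp fw = fw := rfl

theorem pvAgo_letter (c : Char) (rest wtp fw : List Char)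
    (hc : PySem.Chars.isdigit c = false) :
    pvAgo (c :: rest) wtp fw = pvAgo rest (wtp ++ [c]) fw := by
  rw [pvAgo.eq_def]; simp [hc]

theorem pvAgo_digit2 (c d : Char) (rest wtp fw : List Char)
    (hc : PySem.Chars.isdigit c = true) (hd : PySem.Chars.isdigit d = true) :
    pvAgo (c :: d :: rest) wtp fw =
      pvAgo (d :: rest) [] (fw ++ PySem.List.pyRepeat (PySem.Chars.upper wtp) (pvAint [c, d])) := by
  rw [pvAgo]; simp [hc, hd]

theorem pvAgo_digit1 (c d : Char) (rest wtp fw : List Char)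
    (hc : PySem.Chars.isdigit c = true) (hd : PySem.Chars.isdigit d = false) :
    pvAgo (c :: d :: rest) wtp fw =
      pvAgo (d :: rest) [] (fw ++ PySem.List.pyRepeat (PySem.Chars.upper wtp) (pvAint [c])) := by
  rw [pvAgo]; simp [hc, hd]

theorem pvAgo_digitLast (c : Char) (wtp fw : List Char)
    (hc : PySem.Chars.isdigit c = true) :
    pvAgo [c] wtp fw = fw ++ PySem.List.pyRepeat (PySem.Chars.upper wtp) (pvAint [c]) := by
  rw [pvAgo]; simp [hc, pvAgo_nil]

-- repeating the empty string gives the empty string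
theorem pvRepeat_upper_nil (n : Int) :
    PySem.List.pyRepeat (PySem.Chars.upper []) n = [] := by
  simp [PySem.Chars.upper, PySem.List.pyRepeat]

-- B's accumulator: pending output pieces pass straight through the fold
theorem pvBgo_acc (rs : List (Bool × List Char)) (buf : List Char) (out : List (List Char)) :
    pvBgo rs buf out = out ++ pvBgo rs buf [] := by
  induction rs generalizing buf out with
  | nil => simp [pvBgo]
  | cons r rs ih =>
    obtain ⟨isDig, run⟩ := r
    cases isDig with
    | false =>
      show pvBgo rs run out = out ++ pvBgo rs run []
      exact ih run out
    | true =>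
      show pvBgo rs [] (out ++ [_]) = out ++ pvBgo rs [] ([] ++ [_])
      rw [ih [] (out ++ [_]), ih [] ([] ++ [_])]
      simp

-- A over a run of non-digits: the chars just move into the buffer
theorem pvAgo_letters (L : List Char) (h : ∀ x ∈ L, PySem.Chars.isdigit x = false) :
    ∀ (rest wtp fw : List Char), pvAgo (L ++ rest) wtp fw = pvAgo rest (wtp ++ L) fw := by
  induction L with
  | nil => intro rest wtp fw; simp
  | cons c L ih =>
    intro rest wtp fw
    have hc : PySem.Chars.isdigit c = false := h c (by simp)
    rw [List.cons_append, pvAgo_letter c _ _ _ hc,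
      ih (fun x hx => h x (by simp [hx])) rest (wtp ++ [c]) fw]
    simp

-- A over a digit run with EMPTY buffer: nothing is emitted
theorem pvAgo_digits_empty (t : List Char) (ht : ∀ x ∈ t, PySem.Chars.isdigit x = true) :
    ∀ (rest : List Char),
      (∀ d rs, rest = d :: rs → PySem.Chars.isdigit d = false) →
      ∀ fw, pvAgo (t ++ rest) [] fw = pvAgo rest [] fw := by
  induction t with
  | nil => intro rest _ fw; simp
  | cons c t ih =>
    intro rest hrest fw
    have hc : PySem.Chars.isdigit c = true := ht c (by simp)
    have ht' : ∀ x ∈ t, PySem.Chars.isdigit x = true := fun x hx => ht x (by simp [hx])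
    cases t with
    | nil =>
      cases rest with
      | nil => simp [pvAgo_digitLast c [] fw hc, pvRepeat_upper_nil, pvAgo_nil]
      | cons d rs =>
        have hd : PySem.Chars.isdigit d = false := hrest d rs rfl
        rw [List.singleton_append, pvAgo_digit1 c d rs [] fw hc hd, pvRepeat_upper_nil]
        simp
    | cons e t' =>
      have he : PySem.Chars.isdigit e = true := ht' e (by simp)
      rw [List.cons_append, List.cons_append, pvAgo_digit2 c e _ [] fw hc he,
        pvRepeat_upper_nil, List.append_nil, ← List.cons_append]
      exact ih ht' rest hrest fw

-- A over a whole digit run: one emission, with B's multiplier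
theorem pvAgo_digitrun (c : Char) (t : List Char)
    (hc : PySem.Chars.isdigit c = true) (ht : ∀ x ∈ t, PySem.Chars.isdigit x = true) :
    ∀ (rest : List Char),
      (∀ d rs, rest = d :: rs → PySem.Chars.isdigit d = false) →
      ∀ (wtp fw : List Char),
        pvAgo ((c :: t) ++ rest) wtp fw =
          pvAgo rest [] (fw ++ PySem.List.pyRepeat (PySem.Chars.upper wtp) (pvBnum (c :: t))) := by
  intro rest hrest wtp fw
  cases t with
  | nil =>
    cases rest with
    | nil =>
      rw [List.append_nil, pvAgo_digitLast c wtp fw hc, pvAgo_nil]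
      simp [pvBnum, pvAint]
    | cons d rs =>
      have hd : PySem.Chars.isdigit d = false := hrest d rs rfl
      rw [List.singleton_append, pvAgo_digit1 c d rs wtp fw hc hd]
      simp [pvBnum, pvAint]
  | cons e t' =>
    have he : PySem.Chars.isdigit e = true := ht e (by simp)
    have ht' : ∀ x ∈ e :: t', PySem.Chars.isdigit x = true := ht
    rw [List.cons_append, List.cons_append, pvAgo_digit2 c e _ wtp fw hc he,
      ← List.cons_append, pvAgo_digits_empty (e :: t') ht' rest hrest]
    simp [pvBnum, pvAint]

-- the head of a dropWhile fails the test
theorem pvHead_dropWhile {α : Type} (p : α → Bool) (l : List α) (d : α) (rs : List α)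
    (h : l.dropWhile p = d :: rs) : p d = false := by
  induction l with
  | nil => simp at h
  | cons x xs ih =>
    by_cases hx : p x = true
    · rw [List.dropWhile_cons_of_pos hx] at h; exact ih h
    · rw [List.dropWhile_cons_of_neg hx] at h
      cases h; simpa using hx

-- main invariant: A's state machine equals B's fold over the runs, provided the buffer is
-- empty whenever the word starts with a letter run (true initially and preserved)
theorem pvMain (n : Nat) : ∀ (l : List Char), l.length < n →
    ∀ (wtp fw : List Char),
      (∀ c cs, l = c :: cs → PySem.Chars.isdigit c = false → wtp = []) →
      pvAgo l wtp fw = fw ++ (pvBgo (pvRunsBy l) wtp []).flatten := by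
  induction n with
  | zero => intro l hl; omega
  | succ n ih =>
    intro l hl wtp fw hinv
    cases l with
    | nil => simp [pvAgo_nil, pvRunsBy, pvBgo]
    | cons c cs =>
      set p := fun d => PySem.Chars.isdigit d == PySem.Chars.isdigit c with hp
      have hsplit : c :: cs = (c :: cs.takeWhile p) ++ cs.dropWhile p := by
        simp [List.takeWhile_append_dropWhile]
      have hlen : (cs.dropWhile p).length < n := by
        have := List.length_dropWhile_le p cs
        simp only [List.length_cons] at hl; omega
      have hrest : ∀ d rs, cs.dropWhile p = d :: rs →
          PySem.Chars.isdigit d = !(PySem.Chars.isdigit c) := by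
        intro d rs hdr
        have h := pvHead_dropWhile p cs d rs hdr
        simp only [hp, beq_eq_false_iff_ne, ne_eq] at h
        exact Bool.eq_not_iff.mpr h
      have hrun : pvRunsBy (c :: cs) =
          (PySem.Chars.isdigit c, c :: cs.takeWhile p) :: pvRunsBy (cs.dropWhile p) := by
        rw [pvRunsBy]
      by_cases hc : PySem.Chars.isdigit c = true
      · -- digit run
        have htake : ∀ x ∈ cs.takeWhile p, PySem.Chars.isdigit x = true := by
          intro x hx
          have := List.mem_takeWhile_imp hx
          simp only [hp, beq_iff_eq] at this; rw [this, hc]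
        have hrest' : ∀ d rs, cs.dropWhile p = d :: rs → PySem.Chars.isdigit d = false := by
          intro d rs hdr; rw [hrest d rs hdr, hc]; rfl
        conv_lhs => rw [hsplit]
        rw [pvAgo_digitrun c (cs.takeWhile p) hc htake _ hrest' wtp fw]
        rw [ih (cs.dropWhile p) hlen [] _ (by intro _ _ _ _; rfl)]
        rw [hrun]
        show _ = fw ++ (pvBgo ((PySem.Chars.isdigit c, c :: cs.takeWhile p) :: _) wtp []).flatten
        rw [show pvBgo ((PySem.Chars.isdigit c, c :: cs.takeWhile p) :: pvRunsBy (cs.dropWhile p)) wtp []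
            = pvBgo (pvRunsBy (cs.dropWhile p)) []
                ([] ++ [PySem.List.pyRepeat (PySem.Chars.upper wtp) (pvBnum (c :: cs.takeWhile p))]) by
          rw [pvBgo]; simp [hc]]
        rw [pvBgo_acc _ [] ([] ++ [PySem.List.pyRepeat (PySem.Chars.upper wtp) (pvBnum (c :: cs.takeWhile p))])]
        simp only [List.nil_append, List.append_assoc, List.flatten_append, List.flatten_cons,
          List.flatten_nil, List.append_nil]
      · -- letter run
        have hc' : PySem.Chars.isdigit c = false := by simpa using hc
        have hwtp : wtp = [] := hinv c cs rfl hc'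
        subst hwtp
        have htake : ∀ x ∈ cs.takeWhile p, PySem.Chars.isdigit x = false := by
          intro x hx
          have := List.mem_takeWhile_imp hx
          simp only [hp, beq_iff_eq] at this
          rw [this, hc']
        have hletters : ∀ x ∈ c :: cs.takeWhile p, PySem.Chars.isdigit x = false := by
          intro x hx
          rcases List.mem_cons.mp hx with h | h
          · subst h; exact hc'
          · exact htake x h
        have hrest' : ∀ d rs, cs.dropWhile p = d :: rs → PySem.Chars.isdigit d = false → False := by
          intro d rs hdr hd
          have := hrest d rs hdr
          rw [hc', hd] at this
          simp at this
        conv_lhs => rw [hsplit]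
        rw [pvAgo_letters (c :: cs.takeWhile p) hletters _ [] fw]
        rw [ih (cs.dropWhile p) hlen _ _ (fun d rs hdr hd => (hrest' d rs hdr hd).elim)]
        rw [hrun]
        show _ = fw ++ (pvBgo ((PySem.Chars.isdigit c, c :: cs.takeWhile p) :: _) [] []).flatten
        rw [show pvBgo ((PySem.Chars.isdigit c, c :: cs.takeWhile p) :: pvRunsBy (cs.dropWhile p)) [] []
            = pvBgo (pvRunsBy (cs.dropWhile p)) (c :: cs.takeWhile p) [] by
          rw [pvBgo]; simp [hc']]
        simp only [List.nil_append]

-- ===== VERDICT (by name: the statement is the Claim_ definition above) =====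
theorem word_to_capitalize_spec : Claim_equal_word_to_capitalize := by
  intro word _
  unfold Spec_word_to_capitalize word_to_capitalize word_to_capitalize_alt
  rw [pvMain (word.toList.length + 1) word.toList (by omega) [] [] (by intro _ _ _ _; rfl)]
  simp only [List.nil_append]
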